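-- pv_equiv track=rewrite | github.com/PoonLab/vindels | 2_within-host/13_2_ng-overlap.py | extractIndels
-- ===== SOURCE A (Python) =====
-- def extractIndels(aa_anc, aa_tip, deletions=False):
--     indels = []
--
--     #Temporary strings used to store nucleotides from insertion sequences
--     if deletions:
--         swap = aa_anc
--         aa_anc = aa_tip
--         aa_tip = swap
--
--     temp = ''
--
--     #EXTRACT ALL INDELS
--     for n, achar in enumerate(aa_anc):
--         tchar = aa_tip[n]
--
--         # builds the Insertion list
--         #Case 1: no insertion, need to store and retrieve indel data
--         if achar != "-":
--             if temp:
--                 indels.append(tuple((temp,n-1)))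
--                 temp = ''
--
--         #Case 2: insertion
--         elif achar == "-":
--             temp = temp + tchar
--
--     #handles the END case
--     if temp:
--         indels.append(tuple((temp, n - 1)))
--     return indels
-- ===== SOURCE B (Python) =====
-- def extractIndels(aa_anc, aa_tip, deletions=False):
--     # Scan the ancestor for maximal runs of '-' and emit, per run, the matching
--     # tip segment together with the index of the run's last position.
--     if deletions:
--         aa_anc, aa_tip = aa_tip, aa_anc
--     n = len(aa_anc)
--     indels = []
--     i = 0
--     while i < n:
--         if aa_anc[i] == '-':
--             j = i
--             while j < n and aa_anc[j] == '-':
--                 j += 1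
--             indels.append((aa_tip[i:j], j - 1))
--             i = j
--         else:
--             i += 1
--     return indels
-- ===== Notes on version B (the rewrite author's own statement) =====
-- stated objective: alternative
-- what changed: B scans the ancestor for maximal runs of '-' with an inner while loop and emits (aa_tip[i:j], j-1) per run directly, instead of A's char-by-char fold that accumulates a temp string and flushes it at run boundaries and at the end; Pre_ excludes only inputs where A raises IndexError (post-swap tip shorter than ancestor).
-- intended difference: On inputs whose (post-swap) ancestor ends with '-', A's end-case appends the trailing run with index n-1 = len-2 (an off-by-one, even -1 for a lone leading run), while B returns the run's actual last position len-1, the same convention A itself uses for every interior run. — e.g. on extractIndels("A-", "ab", false): A returns [("b", 0)], B returns [("b", 1)]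
import Mathlib
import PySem

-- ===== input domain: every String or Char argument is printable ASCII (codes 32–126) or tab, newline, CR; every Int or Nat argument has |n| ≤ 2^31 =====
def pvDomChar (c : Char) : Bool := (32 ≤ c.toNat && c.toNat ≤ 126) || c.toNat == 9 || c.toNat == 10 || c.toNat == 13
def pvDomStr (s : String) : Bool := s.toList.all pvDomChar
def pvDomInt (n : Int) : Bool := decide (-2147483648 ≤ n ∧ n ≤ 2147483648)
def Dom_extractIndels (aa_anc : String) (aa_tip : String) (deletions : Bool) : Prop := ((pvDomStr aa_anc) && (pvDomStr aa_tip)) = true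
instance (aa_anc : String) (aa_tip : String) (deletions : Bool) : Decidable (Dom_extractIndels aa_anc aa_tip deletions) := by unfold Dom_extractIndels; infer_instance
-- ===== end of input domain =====

-- B replaces A's char-by-char temp-accumulator fold by a run-based scan over maximal '-' runs
-- (objective: alternative decomposition, same O(n) cost); on ancestors ending in '-' A's end-case
-- index is off by one and B returns the intended index (see D_ below).

-- ===== PORT A =====
-- A's for-loop over enumerate(aa_anc) with state (indels, temp); temp kept as the list of
-- chars of Python's growing string, appended tuples use String.mk temp.
def goA (tip : List Char) : List Char → Nat → List (String × Int) × List Char → List (String × Int) × List Char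
  | [], _, st => st
  | achar :: rest, n, (indels, temp) =>
    let tchar := (PySem.List.pyGet? tip (n : Int)).getD ' '   -- IndexError case excluded by Pre_
    if achar ≠ '-' then
      if temp ≠ [] then goA tip rest (n + 1) (indels ++ [(String.mk temp, (n : Int) - 1)], [])
      else goA tip rest (n + 1) (indels, temp)
    else goA tip rest (n + 1) (indels, temp ++ [tchar])

def extractIndels (aa_anc : String) (aa_tip : String) (deletions : Bool) : List (String × Int) :=
  let anc := (if deletions then aa_tip else aa_anc).toList
  let tip := (if deletions then aa_anc else aa_tip).toList
  let st := goA tip anc 0 ([], [])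
  -- END case: the loop variable n equals anc.length - 1 here (temp ≠ [] forces anc ≠ []),
  -- so Python's n - 1 is anc.length - 2.
  if st.2 ≠ [] then st.1 ++ [(String.mk st.2, (anc.length : Int) - 2)] else st.1

-- ===== PORT B =====
-- B's outer while: at a '-' scan the whole run with the inner while (gapRun), emit the
-- slice of tip and the index j - 1 of the run's last position, continue after the run.
-- The first Nat argument of goB is fuel (= anc.length at the start), only a totality guard
-- for the while loop: every iteration consumes at least one character.
def gapRun : List Char → Nat
  | [] => 0
  | c :: rest => if c = '-' then gapRun rest + 1 else 0

def goB (tip : List Char) : Nat → List Char → Nat → List (String × Int)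
  | _, [], _ => []
  | 0, _ :: _, _ => []
  | fuel + 1, c :: rest, i =>
    if c = '-' then
      let k := gapRun rest + 1                 -- inner while: j = i + k
      (String.mk (PySem.List.slice tip (some (i : Int)) (some ((i : Int) + (k : Int)))), (i : Int) + (k : Int) - 1)
        :: goB tip fuel (rest.drop (k - 1)) (i + k)
    else
      goB tip fuel rest (i + 1)

def extractIndels_alt (aa_anc : String) (aa_tip : String) (deletions : Bool) : List (String × Int) :=
  let anc := (if deletions then aa_tip else aa_anc).toList
  let tip := (if deletions then aa_anc else aa_tip).toList
  goB tip anc.length anc 0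

-- ===== PRECONDITION & SPEC =====
-- Pre_ excludes exactly the inputs where A raises IndexError: the (post-swap) tip shorter
-- than the (post-swap) ancestor.
def Pre_extractIndels (aa_anc : String) (aa_tip : String) (deletions : Bool) : Prop :=
  if deletions then aa_tip.length ≤ aa_anc.length else aa_anc.length ≤ aa_tip.length
instance (aa_anc : String) (aa_tip : String) (deletions : Bool) : Decidable (Pre_extractIndels aa_anc aa_tip deletions) := by unfold Pre_extractIndels; infer_instance

def pvWitness_extractIndels : String × String × Bool := ("A--C", "abde", false)

-- On inputs whose (post-swap) ancestor ends with '-', A's end-case appends the trailing run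
-- with index len-2 (an off-by-one, even -1 for a lone leading run), while B returns the run's
-- actual last position len-1, the same convention A itself uses for every interior run.
def D_extractIndels (aa_anc : String) (aa_tip : String) (deletions : Bool) : Prop :=
  (deletions = true ∧ aa_tip.toList.getLast? = some '-') ∨ (deletions = false ∧ aa_anc.toList.getLast? = some '-')
instance (aa_anc : String) (aa_tip : String) (deletions : Bool) : Decidable (D_extractIndels aa_anc aa_tip deletions) := by unfold D_extractIndels; infer_instance

def Spec_extractIndels (aa_anc : String) (aa_tip : String) (deletions : Bool) (out : List (String × Int)) : Prop := ¬ D_extractIndels aa_anc aa_tip deletions → out = extractIndels_alt aa_anc aa_tip deletions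
instance (aa_anc : String) (aa_tip : String) (deletions : Bool) (out : List (String × Int)) : Decidable (Spec_extractIndels aa_anc aa_tip deletions out) := by unfold Spec_extractIndels; infer_instance

def pvDiffWitness_extractIndels : String × String × Bool := ("A-", "ab", false)
def pvDiffWitnessOut_extractIndels : (List (String × Int)) × (List (String × Int)) := ([("b", 0)], [("b", 1)])

-- ===== CLAIM (what is proved, stated in full; the proofs are below) =====
def Claim_unchanged_extractIndels : Prop := ∀ (aa_anc : String) (aa_tip : String) (deletions : Bool), Dom_extractIndels aa_anc aa_tip deletions → Pre_extractIndels aa_anc aa_tip deletions → Spec_extractIndels aa_anc aa_tip deletions (extractIndels aa_anc aa_tip deletions)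
def Claim_changed_extractIndels : Prop := Dom_extractIndels (pvDiffWitness_extractIndels.1) (pvDiffWitness_extractIndels.2.1) (pvDiffWitness_extractIndels.2.2) ∧ Pre_extractIndels (pvDiffWitness_extractIndels.1) (pvDiffWitness_extractIndels.2.1) (pvDiffWitness_extractIndels.2.2) ∧ D_extractIndels (pvDiffWitness_extractIndels.1) (pvDiffWitness_extractIndels.2.1) (pvDiffWitness_extractIndels.2.2) ∧ extractIndels (pvDiffWitness_extractIndels.1) (pvDiffWitness_extractIndels.2.1) (pvDiffWitness_extractIndels.2.2) = pvDiffWitnessOut_extractIndels.1 ∧ extractIndels_alt (pvDiffWitness_extractIndels.1) (pvDiffWitness_extractIndels.2.1) (pvDiffWitness_extractIndels.2.2) = pvDiffWitnessOut_extractIndels.2 ∧ pvDiffWitnessOut_extractIndels.1 ≠ pvDiffWitnessOut_extractIndels.2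
def Claim_exact_extractIndels : Prop := ∀ (aa_anc : String) (aa_tip : String) (deletions : Bool), Dom_extractIndels aa_anc aa_tip deletions → Pre_extractIndels aa_anc aa_tip deletions → D_extractIndels aa_anc aa_tip deletions → extractIndels aa_anc aa_tip deletions ≠ extractIndels_alt aa_anc aa_tip deletions

-- ===== LEMMAS AND PROOFS =====

-- goBc: proof-only variant of goB whose run index carries A's end-case (len-2 on a trailing
-- run); it characterises A's result exactly, and is compared with goB under ¬D_ / D_.
def goBc (tip : List Char) (L : Nat) : Nat → List Char → Nat → List (String × Int)
  | _, [], _ => []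
  | 0, _ :: _, _ => []
  | fuel + 1, c :: rest, i =>
    if c = '-' then
      let k := gapRun rest + 1
      let index : Int := if i + k < L then (i : Int) + (k : Int) - 1 else (L : Int) - 2
      (String.mk (PySem.List.slice tip (some (i : Int)) (some ((i : Int) + (k : Int)))), index)
        :: goBc tip L fuel (rest.drop (k - 1)) (i + k)
    else
      goBc tip L fuel rest (i + 1)

theorem goBc_fuel (tip : List Char) (L : Nat) :
    ∀ (f1 f2 : Nat) (rest : List Char) (i : Nat), rest.length ≤ f1 → rest.length ≤ f2 →
      goBc tip L f1 rest i = goBc tip L f2 rest i := by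
  intro f1
  induction f1 with
  | zero =>
    intro f2 rest i h1 _
    have : rest = [] := by cases rest <;> simp_all
    subst this; cases f2 <;> simp [goBc]
  | succ f1 ih =>
    intro f2 rest i h1 h2
    cases rest with
    | nil => cases f2 <;> simp [goBc]
    | cons c rs =>
      cases f2 with
      | zero => simp at h2
      | succ f2 =>
        simp only [goBc]
        by_cases hc : c = '-'
        · rw [if_pos hc, if_pos hc]
          have hd : (rs.drop (gapRun rs + 1 - 1)).length ≤ f1 := by
            simp at h1 ⊢; omega
          have hd2 : (rs.drop (gapRun rs + 1 - 1)).length ≤ f2 := by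
            simp at h2 ⊢; omega
          rw [ih f2 _ _ hd hd2]
        · rw [if_neg hc, if_neg hc]
          exact ih f2 rs (i + 1) (by simp at h1; omega) (by simp at h2; omega)

-- "finish" = A's END-case append after the loop.
def finishA (L : Nat) (st : List (String × Int) × List Char) : List (String × Int) :=
  if st.2 ≠ [] then st.1 ++ [(String.mk st.2, (L : Int) - 2)] else st.1

-- Bridge: A's fold (with pending temp) against the run scan, by induction on the suffix.
theorem goA_goBc (tip : List Char) (L : Nat) (hL : L ≤ tip.length) :
    ∀ (rest : List Char) (i : Nat), i + rest.length = L →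
    ∀ (indels : List (String × Int)) (temp : List Char),
    finishA L (goA tip rest i (indels, temp)) =
      if temp = [] then indels ++ goBc tip L rest.length rest i
      else
        indels ++ [(String.mk (temp ++ (tip.drop i).take (gapRun rest)),
                    if i + gapRun rest < L then (i : Int) + (gapRun rest : Int) - 1 else (L : Int) - 2)]
               ++ goBc tip L rest.length (rest.drop (gapRun rest)) (i + gapRun rest) := by
  intro rest
  induction rest with
  | nil =>
    intro i h indels temp
    simp only [List.length_nil, Nat.add_zero] at h
    by_cases ht : temp = []
    · simp [ht, goA, goBc, finishA]
    · simp only [goA, finishA, gapRun, goBc]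
      simp [ht, goBc]
      omega
  | cons c rs ih =>
    intro i h indels temp
    have hlen : i + (rs.length + 1) = L := by simpa using h
    have hi : i < tip.length := by omega
    by_cases hc : c = '-'
    · -- gap: A extends temp; the scan consumes the whole run
      have hdrop : tip.drop i = tip[i] :: tip.drop (i + 1) :=
        List.drop_eq_getElem_cons hi
      have lhs : goA tip (c :: rs) i (indels, temp)
          = goA tip rs (i + 1) (indels, temp ++ [tip[i]]) := by
        simp [goA, hc, PySem.List.pyGet?_natCast, List.getElem?_eq_getElem hi]
      rw [lhs, ih (i + 1) (by omega) indels (temp ++ [tip[i]])]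
      rw [if_neg (by simp)]
      have hgap : gapRun (c :: rs) = gapRun rs + 1 := by simp [gapRun, hc]
      have hslice : PySem.List.slice tip (some (i : Int)) (some ((i : Int) + ((gapRun rs + 1 : Nat) : Int)))
          = tip[i] :: (tip.drop (i + 1)).take (gapRun rs) := by
        rw [PySem.List.slice_natCast_add, hdrop, List.take_succ_cons]
      have hnat : i + (gapRun rs + 1) = i + 1 + gapRun rs := by omega
      have hidx : (if i + 1 + gapRun rs < L then (i : Int) + ((gapRun rs + 1 : Nat) : Int) - 1 else (L : Int) - 2)
          = (if i + 1 + gapRun rs < L then ((i + 1 : Nat) : Int) + ((gapRun rs : Nat) : Int) - 1 else (L : Int) - 2) := by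
        split_ifs <;> push_cast <;> ring
      by_cases ht : temp = []
      · subst ht
        rw [if_pos rfl]
        show _ = indels ++ goBc tip L (rs.length + 1) (c :: rs) i
        simp only [goBc, if_pos hc, hslice, Nat.add_sub_cancel, hnat, hidx]
        simp [List.append_assoc]
      · rw [if_neg ht, hgap]
        simp only [List.drop_succ_cons, List.length_cons, hnat, hidx]
        rw [goBc_fuel tip L (rs.length + 1) rs.length _ _ (by simp only [List.length_drop]; omega) (by simp only [List.length_drop]; omega)]
        have e1 : temp ++ List.take (gapRun rs + 1) (List.drop i tip)
            = temp ++ [tip[i]] ++ List.take (gapRun rs) (List.drop (i + 1) tip) := by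
          rw [hdrop, List.take_succ_cons]; simp
        rw [e1]
    · -- no gap at c
      have hgap : gapRun (c :: rs) = 0 := by simp [gapRun, hc]
      have hstep : goBc tip L (rs.length + 1) (c :: rs) i = goBc tip L rs.length rs (i + 1) := by
        simp only [goBc, if_neg hc]
      by_cases ht : temp = []
      · subst ht
        have lhs : goA tip (c :: rs) i (indels, ([] : List Char))
            = goA tip rs (i + 1) (indels, []) := by
          simp [goA, hc]
        rw [lhs, ih (i + 1) (by omega) indels [], if_pos rfl, if_pos rfl]
        simp only [List.length_cons, hstep]
      · have lhs : goA tip (c :: rs) i (indels, temp)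
            = goA tip rs (i + 1) (indels ++ [(String.mk temp, (i : Int) - 1)], []) := by
          simp [goA, hc, ht]
        rw [lhs, ih (i + 1) (by omega) _ [], if_pos rfl, if_neg ht]
        rw [hgap]
        simp only [List.take_zero, List.append_nil, List.drop_zero, Nat.add_zero,
          List.length_cons, hstep]
        simp [List.append_assoc]
        omega

theorem main_eq (anc tip : List Char) (h : anc.length ≤ tip.length) :
    (if (goA tip anc 0 ([], [])).2 ≠ [] then
        (goA tip anc 0 ([], [])).1 ++ [(String.mk (goA tip anc 0 ([], [])).2, (anc.length : Int) - 2)]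
      else (goA tip anc 0 ([], [])).1)
      = goBc tip anc.length anc.length anc 0 := by
  have := goA_goBc tip anc.length h anc 0 (by omega) [] []
  simpa [finishA] using this

theorem gapRun_le (l : List Char) : gapRun l ≤ l.length := by
  induction l with
  | nil => simp [gapRun]
  | cons c rs ih => by_cases hc : c = '-' <;> simp [gapRun, hc] <;> omega

theorem gapRun_full (l : List Char) (h : gapRun l = l.length) : ∀ c ∈ l, c = '-' := by
  induction l with
  | nil => simp
  | cons c rs ih =>
    by_cases hc : c = '-'
    · simp [gapRun, hc] at h
      intro x hx
      rcases List.mem_cons.mp hx with hx | hx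
      · rw [hx]; exact hc
      · exact ih h x hx
    · simp [gapRun, hc] at h

theorem getLast?_drop_of_lt (l : List Char) (m : Nat) (h : m < l.length) :
    (l.drop m).getLast? = l.getLast? := by
  have hne : l.drop m ≠ [] := by
    intro he
    have := congrArg List.length he
    simp at this; omega
  rw [List.getLast?_eq_getElem?, List.getLast?_eq_getElem?]
  rw [List.getElem?_drop]
  congr 1
  simp
  omega

theorem getLast?_cons_ne (c : Char) (rs : List Char) (h : rs ≠ []) :
    (c :: rs).getLast? = rs.getLast? := by
  cases rs with
  | nil => simp at h
  | cons a l => simp [List.getLast?_cons_cons]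

-- Outside D_: the conditional index never takes its end branch, so goBc = goB.
theorem goBc_eq_goB (tip : List Char) (L : Nat) :
    ∀ (fuel : Nat) (rest : List Char) (i : Nat), rest.length ≤ fuel → i + rest.length = L →
      rest.getLast? ≠ some '-' →
      goBc tip L fuel rest i = goB tip fuel rest i := by
  intro fuel
  induction fuel with
  | zero =>
    intro rest i h1 _ _
    have : rest = [] := by cases rest <;> simp_all
    subst this; simp [goBc, goB]
  | succ fuel ih =>
    intro rest i h1 h2 hlast
    cases rest with
    | nil => simp [goBc, goB]
    | cons c rs =>
      by_cases hc : c = '-'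
      · have hrs : rs ≠ [] := by
          intro he; subst he
          simp [List.getLast?] at hlast
          exact hlast hc
        have hlast' : rs.getLast? ≠ some '-' := by
          rwa [getLast?_cons_ne c rs hrs] at hlast
        have hlt : gapRun rs < rs.length := by
          rcases Nat.lt_or_ge (gapRun rs) rs.length with h | h
          · exact h
          · exfalso
            have heq : gapRun rs = rs.length := le_antisymm (gapRun_le rs) h
            have : rs.getLast? = some '-' := by
              cases rs with
              | nil => simp at hrs
              | cons a l =>
                rw [List.getLast?_eq_getElem?]
                have hm : (a :: l).length - 1 < (a :: l).length := by simp
                rw [List.getElem?_eq_getElem hm]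
                exact congrArg some (gapRun_full _ heq _ (List.getElem_mem _))
            exact hlast' this
        simp only [goBc, goB, if_pos hc]
        have hcond : i + (gapRun rs + 1) < L := by
          simp at h2; omega
        rw [if_pos hcond]
        congr 1
        apply ih
        · simp only [List.length_drop]
          simp at h1; omega
        · simp only [List.length_drop]
          simp at h2 ⊢; omega
        · rw [Nat.add_sub_cancel]
          rwa [getLast?_drop_of_lt rs (gapRun rs) hlt]
      · simp only [goBc, goB, if_neg hc]
        apply ih rs (i + 1) (by simp at h1; omega) (by simp at h2 ⊢; omega)
        cases rs with
        | nil => simp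
        | cons a l => rwa [getLast?_cons_ne c (a :: l) (by simp)] at hlast

-- Inside D_: the trailing run gets index L-2 from goBc but L-1 from goB, so they differ.
theorem goBc_ne_goB (tip : List Char) (L : Nat) :
    ∀ (fuel : Nat) (rest : List Char) (i : Nat), rest.length ≤ fuel → i + rest.length = L →
      rest.getLast? = some '-' →
      goBc tip L fuel rest i ≠ goB tip fuel rest i := by
  intro fuel
  induction fuel with
  | zero =>
    intro rest i h1 _ hlast
    have : rest = [] := by cases rest <;> simp_all
    subst this; simp at hlast
  | succ fuel ih =>
    intro rest i h1 h2 hlast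
    cases rest with
    | nil => simp at hlast
    | cons c rs =>
      by_cases hc : c = '-'
      · by_cases hlt : gapRun rs < rs.length
        · have hcond : i + (gapRun rs + 1) < L := by simp at h2; omega
          simp only [goBc, goB, if_pos hc, if_pos hcond, ne_eq, List.cons.injEq, not_and]
          intro _
          apply ih
          · simp only [List.length_drop]; simp at h1; omega
          · simp only [List.length_drop]; simp at h2 ⊢; omega
          · rw [Nat.add_sub_cancel]
            have hrs : rs ≠ [] := by intro he; subst he; simp at hlt
            rw [getLast?_drop_of_lt rs (gapRun rs) hlt]
            rwa [getLast?_cons_ne c rs hrs] at hlast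
        · have heq : gapRun rs = rs.length := le_antisymm (gapRun_le rs) (by omega)
          have hcond : ¬ (i + (gapRun rs + 1) < L) := by simp at h2; omega
          simp only [goBc, goB, if_pos hc, if_neg hcond, ne_eq, List.cons.injEq, not_and]
          intro hhead
          exfalso
          have h2' : ((L : Int) - 2) = (i : Int) + ((gapRun rs + 1 : Nat) : Int) - 1 :=
            congrArg Prod.snd hhead
          simp at h2
          push_cast at h2'
          omega
      · have hrs : rs ≠ [] := by
          intro he; subst he
          simp [List.getLast?] at hlast
          exact hc hlast
        simp only [goBc, goB, if_neg hc]
        apply ih rs (i + 1) (by simp at h1; omega) (by simp at h2 ⊢; omega)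
        rwa [getLast?_cons_ne c rs hrs] at hlast

theorem extractIndels_spec : Claim_unchanged_extractIndels := by
  intro a t d _ hpre
  unfold Spec_extractIndels
  intro hnd
  unfold extractIndels extractIndels_alt
  unfold Pre_extractIndels at hpre
  unfold D_extractIndels at hnd
  cases d
  · simp only [Bool.false_eq_true, if_false] at hpre ⊢
    simp only [Bool.false_eq_true, false_and, and_true, false_or, eq_self_iff_true, true_and] at hnd
    rw [main_eq a.toList t.toList (by simpa [String.length_toList] using hpre)]
    exact goBc_eq_goB t.toList a.toList.length a.toList.length a.toList 0 le_rfl (by omega) hnd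
  · simp only [if_true] at hpre ⊢
    simp only [Bool.true_eq_false, false_and, and_true, or_false, eq_self_iff_true, true_and] at hnd
    rw [main_eq t.toList a.toList (by simpa [String.length_toList] using hpre)]
    exact goBc_eq_goB a.toList t.toList.length t.toList.length t.toList 0 le_rfl (by omega) hnd

theorem extractIndels_changed : Claim_changed_extractIndels := by
  unfold Claim_changed_extractIndels; decide

theorem extractIndels_tight : Claim_exact_extractIndels := by
  intro a t d _ hpre hd
  unfold extractIndels extractIndels_alt
  unfold Pre_extractIndels at hpre
  unfold D_extractIndels at hd
  cases d
  · simp only [Bool.false_eq_true, if_false] at hpre ⊢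
    simp only [Bool.false_eq_true, false_and, and_true, false_or, eq_self_iff_true, true_and] at hd
    rw [main_eq a.toList t.toList (by simpa [String.length_toList] using hpre)]
    exact goBc_ne_goB t.toList a.toList.length a.toList.length a.toList 0 le_rfl (by omega) hd
  · simp only [if_true] at hpre ⊢
    simp only [Bool.true_eq_false, false_and, and_true, or_false, eq_self_iff_true, true_and] at hd
    rw [main_eq t.toList a.toList (by simpa [String.length_toList] using hpre)]
    exact goBc_ne_goB a.toList t.toList.length t.toList.length t.toList 0 le_rfl (by omega) hd
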